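-- pv_equiv track=rewrite | github.com/shrikarK10/DSA-Codes | (Easy) 2511. Maximum Enemy Forts That Can Be Captured.py | captureForts
-- ===== SOURCE A (Python) =====
-- from typing import List
--
-- def captureForts(forts: List[int]) -> int:
--     last = -1
--     ans = 0
--
--     for i, v in enumerate(forts):
--         if v != 0:
--             if last != -1 and forts[last] != v:
--                 ans = max(ans, i - last - 1)
--             last = i
--     return ans
-- ===== SOURCE B (Python) =====
-- from typing import List
--
-- def captureForts(forts: List[int]) -> int:
--     # Run-length encode the array, then take the longest zero-run whose two
--     # neighbouring runs carry different values.
--     runs = []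
--     for v in forts:
--         if runs and runs[-1][0] == v:
--             runs[-1] = (v, runs[-1][1] + 1)
--         else:
--             runs.append((v, 1))
--     best = 0
--     for left, mid, right in zip(runs, runs[1:], runs[2:]):
--         if mid[0] == 0 and left[0] != right[0]:
--             best = max(best, mid[1])
--     return best
-- ===== Notes on version B (the rewrite author's own statement) =====
-- stated objective: alternative
-- what changed: B run-length encodes the array into (value, count) runs without tracking any indices, then returns the longest zero-run whose two neighbouring runs carry different values (a sliding window of three runs); A instead scans positions with a running last-nonzero index sentinel and maximises index gaps.
import Mathlib
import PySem

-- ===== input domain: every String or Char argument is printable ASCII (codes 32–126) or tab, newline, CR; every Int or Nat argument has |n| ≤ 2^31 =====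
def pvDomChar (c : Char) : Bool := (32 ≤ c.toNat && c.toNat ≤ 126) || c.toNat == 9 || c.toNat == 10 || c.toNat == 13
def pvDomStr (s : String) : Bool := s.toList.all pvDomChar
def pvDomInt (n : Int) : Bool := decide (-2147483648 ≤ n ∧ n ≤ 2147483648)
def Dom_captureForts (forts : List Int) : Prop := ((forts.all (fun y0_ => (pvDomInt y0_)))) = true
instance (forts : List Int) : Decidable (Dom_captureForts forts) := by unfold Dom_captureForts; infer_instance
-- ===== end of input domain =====

-- B abandons A's index scan with a last-nonzero sentinel: it run-length encodes the array
-- into (value, count) runs and returns the longest zero-run between two unequal-valued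
-- neighbouring runs (objective: alternative).

-- ===== PORT A =====
-- loop body of A; forts[last] is read only when last ≠ -1, where it is always in range,
-- so pyGetD with default 0 is exact there
def stepA (forts : List Int) (st : Int × Int) (iv : Int × Int) : Int × Int :=
  if iv.2 ≠ 0 then
    (iv.1,
     if st.1 ≠ -1 ∧ PySem.List.pyGetD forts st.1 0 ≠ iv.2 then max st.2 (iv.1 - st.1 - 1) else st.2)
  else st

def captureForts (forts : List Int) : Int :=
  ((PySem.List.enumerate forts).foldl (stepA forts) (-1, 0)).2

-- ===== PORT B =====
-- body of B's first loop: extend the last run or start a new one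
def pushRun (runs : List (Int × Int)) (v : Int) : List (Int × Int) :=
  match runs.getLast? with
  | some (w, c) => if w = v then runs.dropLast ++ [(v, c + 1)] else runs ++ [(v, 1)]
  | none => [(v, 1)]

-- body of B's second loop over (left, mid, right) windows of runs
def stepB (best : Int) (t : (Int × Int) × ((Int × Int) × (Int × Int))) : Int :=
  if t.2.1.1 = 0 ∧ t.1.1 ≠ t.2.2.1 then max best t.2.1.2 else best

def captureForts_alt (forts : List Int) : Int :=
  let runs := forts.foldl pushRun []
  (runs.zip (runs.tail.zip runs.tail.tail)).foldl stepB 0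

-- ===== PRECONDITION & SPEC =====
def Spec_captureForts (forts : List Int) (out : Int) : Prop := out = captureForts_alt forts
instance (forts : List Int) (out : Int) : Decidable (Spec_captureForts forts out) := by unfold Spec_captureForts; infer_instance

-- ===== CLAIM (what is proved, stated in full; the proofs are below) =====
def Claim_equal_captureForts : Prop := ∀ (forts : List Int), Dom_captureForts forts → Spec_captureForts forts (captureForts forts)

-- ===== LEMMAS AND PROOFS =====

-- common intermediate: a direct recursion with state (last nonzero value, zeros since, best)
def Mre : List Int → Option Int → Int → Int → Int
  | [], _, _, best => best
  | v :: t, prev, z, best =>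
    if v = 0 then Mre t prev (z + 1) best
    else Mre t (some v) 0
      (match prev with | some w => if w ≠ v then max best z else best | none => best)

-- run-length encoding, front recursion
def rle : List Int → List (Int × Int)
  | [] => []
  | v :: t =>
    match rle t with
    | (w, c) :: r => if w = v then (v, 1 + c) :: r else (v, 1) :: (w, c) :: r
    | [] => [(v, 1)]

def glue (w c : Int) : List (Int × Int) → List (Int × Int)
  | (v, d) :: r => if v = w then (w, c + d) :: r else (w, c) :: (v, d) :: r
  | [] => [(w, c)]

def expand : List (Int × Int) → List Int
  | [] => []
  | (v, c) :: r => List.replicate c.toNat v ++ expand r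

def Mrun : List (Int × Int) → Option Int → Int → Int → Int
  | [], _, _, best => best
  | (v, c) :: R, prev, z, best =>
    if v = 0 then Mrun R prev (z + c) best
    else Mrun R (some v) 0
      (match prev with | some w => if w ≠ v then max best z else best | none => best)

def tscan : List (Int × Int) → Int → Int
  | l :: m :: r :: t, best =>
      tscan (m :: r :: t) (if m.1 = 0 ∧ l.1 ≠ r.1 then max best m.2 else best)
  | _, best => best

theorem rle_cons (v : Int) (t : List Int) :
    rle (v :: t) = match rle t with
      | (w, c) :: r => if w = v then (v, 1 + c) :: r else (v, 1) :: (w, c) :: r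
      | [] => [(v, 1)] := rfl

theorem rle_cons_nil (v : Int) (t : List Int) (h : rle t = []) :
    rle (v :: t) = [(v, 1)] := by rw [rle_cons, h]

theorem rle_cons_cons (v : Int) (t : List Int) (u d : Int) (r : List (Int × Int))
    (h : rle t = (u, d) :: r) :
    rle (v :: t) = if u = v then (v, 1 + d) :: r else (v, 1) :: (u, d) :: r := by
  rw [rle_cons, h]

-- ---- A-side: A's fold equals Mre ----
theorem enum_fact (forts : List Int) :
    ∀ p ∈ PySem.List.enumerate forts, 0 ≤ p.1 ∧ PySem.List.pyGetD forts p.1 0 = p.2 := by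
  intro p hp
  rw [PySem.List.mem_enumerate_iff] at hp
  obtain ⟨k, hk, rfl⟩ := hp
  simp [List.getElem?_eq_getElem hk]

theorem loopA_some (forts : List Int) :
    ∀ (t : List Int) (s j w ans : Int),
    (∀ p ∈ PySem.List.enumerate t s, 0 ≤ p.1 ∧ PySem.List.pyGetD forts p.1 0 = p.2) →
    0 ≤ j → j < s → PySem.List.pyGetD forts j 0 = w →
    ((PySem.List.enumerate t s).foldl (stepA forts) (j, ans)).2
      = Mre t (some w) (s - j - 1) ans := by
  intro t
  induction t with
  | nil => intro s j w ans _ _ _ _; simp [Mre]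
  | cons v t' ih =>
    intro s j w ans H hj hjs hw
    rw [PySem.List.enumerate_cons] at H ⊢
    obtain ⟨hs0, hsv⟩ := H (s, v) (by simp)
    have H' : ∀ p ∈ PySem.List.enumerate t' (s + 1), 0 ≤ p.1 ∧ PySem.List.pyGetD forts p.1 0 = p.2 :=
      fun p hp => H p (List.mem_cons_of_mem _ hp)
    have hne : j ≠ -1 := by omega
    by_cases hv : v = 0
    · rw [List.foldl_cons, show stepA forts (j, ans) (s, v) = (j, ans) by simp [stepA, hv]]
      have := ih (s + 1) j w ans H' hj (by omega) hw
      rw [this]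
      simp only [Mre, hv]
      congr 1
      omega
    · rw [List.foldl_cons,
        show stepA forts (j, ans) (s, v)
            = (s, if w ≠ v then max ans (s - j - 1) else ans) by
          by_cases hwv : w = v <;> simp [stepA, hv, hne, hw, hwv]]
      rw [ih (s + 1) s v _ H' hs0 (by omega) hsv]
      simp only [Mre, hv]
      congr 1
      omega

theorem loopA_none (forts : List Int) :
    ∀ (t : List Int) (s ans z : Int),
    (∀ p ∈ PySem.List.enumerate t s, 0 ≤ p.1 ∧ PySem.List.pyGetD forts p.1 0 = p.2) →
    ((PySem.List.enumerate t s).foldl (stepA forts) (-1, ans)).2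
      = Mre t none z ans := by
  intro t
  induction t with
  | nil => intro s ans z _; simp [Mre]
  | cons v t' ih =>
    intro s ans z H
    rw [PySem.List.enumerate_cons] at H ⊢
    obtain ⟨hs0, hsv⟩ := H (s, v) (by simp)
    have H' : ∀ p ∈ PySem.List.enumerate t' (s + 1), 0 ≤ p.1 ∧ PySem.List.pyGetD forts p.1 0 = p.2 :=
      fun p hp => H p (List.mem_cons_of_mem _ hp)
    by_cases hv : v = 0
    · rw [List.foldl_cons, show stepA forts (-1, ans) (s, v) = (-1, ans) by simp [stepA, hv]]
      rw [ih (s + 1) ans (z + 1) H']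
      simp [Mre, hv]
    · rw [List.foldl_cons, show stepA forts (-1, ans) (s, v) = (s, ans) by simp [stepA, hv]]
      rw [loopA_some forts t' (s + 1) s v ans H' hs0 (by omega) hsv]
      simp [Mre, hv]

theorem A_eq_Mre (forts : List Int) : captureForts forts = Mre forts none 0 0 := by
  unfold captureForts
  exact loopA_none forts forts 0 0 0 (enum_fact forts)

-- ---- B-side: the foldl build equals rle ----
theorem foldl_pushRun (xs : List Int) :
    ∀ (acc : List (Int × Int)) (w c : Int),
    List.foldl pushRun (acc ++ [(w, c)]) xs = acc ++ glue w c (rle xs) := by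
  induction xs with
  | nil => intro acc w c; simp [glue, rle]
  | cons v t ih =>
    intro acc w c
    rw [List.foldl_cons]
    have hlast : (acc ++ [(w, c)]).getLast? = some (w, c) := by simp
    have hdrop : (acc ++ [(w, c)]).dropLast = acc := by simp
    by_cases hwv : w = v
    · rw [show pushRun (acc ++ [(w, c)]) v = acc ++ [(v, c + 1)] by
        simp [pushRun, hwv]]
      rw [ih acc v (c + 1)]
      congr 1
      cases hrt : rle t with
      | nil => rw [rle_cons_nil v t hrt]; simp [glue, hwv]
      | cons p r =>
        obtain ⟨u, d⟩ := p
        rw [rle_cons_cons v t u d r hrt]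
        by_cases huv : u = v
        · simp [glue, hwv, huv, add_assoc]
        · simp [glue, hwv, huv]
    · rw [show pushRun (acc ++ [(w, c)]) v = (acc ++ [(w, c)]) ++ [(v, 1)] by
        simp [pushRun, hlast, hwv]]
      rw [ih (acc ++ [(w, c)]) v 1, List.append_assoc]
      congr 1
      cases hrt : rle t with
      | nil => rw [rle_cons_nil v t hrt]; simp [glue, Ne.symm hwv]
      | cons p r =>
        obtain ⟨u, d⟩ := p
        rw [rle_cons_cons v t u d r hrt]
        by_cases huv : u = v
        · subst huv
          simp [glue, Ne.symm hwv]
        · simp [glue, huv, Ne.symm hwv]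

theorem build_eq_rle (forts : List Int) : forts.foldl pushRun [] = rle forts := by
  cases forts with
  | nil => simp [rle]
  | cons v t =>
    rw [List.foldl_cons, show pushRun [] v = [] ++ [(v, 1)] by simp [pushRun]]
    rw [foldl_pushRun t [] v 1]
    simp only [List.nil_append]
    cases hrt : rle t with
    | nil => rw [rle_cons_nil v t hrt]; simp [glue]
    | cons p r =>
      obtain ⟨u, d⟩ := p
      rw [rle_cons_cons v t u d r hrt]
      by_cases huv : u = v
      · subst huv; simp [glue]
      · simp [glue, huv]

-- ---- rle facts ----
theorem rle_counts (xs : List Int) : ∀ p ∈ rle xs, 1 ≤ p.2 := by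
  induction xs with
  | nil => simp [rle]
  | cons v t ih =>
    intro p hp
    cases hrt : rle t with
    | nil => rw [rle_cons_nil v t hrt] at hp; simp at hp; simp [hp]
    | cons q r =>
      obtain ⟨u, d⟩ := q
      have hd : 1 ≤ d := ih (u, d) (by rw [hrt]; simp)
      rw [rle_cons_cons v t u d r hrt] at hp
      by_cases huv : u = v
      · rw [if_pos huv] at hp
        rcases List.mem_cons.mp hp with h | h
        · subst h; simp; omega
        · exact ih _ (by rw [hrt]; simp [h])
      · rw [if_neg huv] at hp
        rcases List.mem_cons.mp hp with h | h
        · subst h; simp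
        · exact ih _ (by rw [hrt]; exact h)

theorem rle_chain (xs : List Int) :
    List.IsChain (fun p q : Int × Int => p.1 ≠ q.1) (rle xs) := by
  induction xs with
  | nil => simp [rle]
  | cons v t ih =>
    cases hrt : rle t with
    | nil => rw [rle_cons_nil v t hrt]; simp
    | cons q r =>
      obtain ⟨u, d⟩ := q
      rw [hrt] at ih
      rw [rle_cons_cons v t u d r hrt]
      by_cases huv : u = v
      · subst huv
        rw [if_pos rfl]
        cases r with
        | nil => simp
        | cons q' r' =>
          rw [List.isChain_cons_cons] at ih ⊢
          exact ⟨ih.1, ih.2⟩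
      · rw [if_neg huv, List.isChain_cons_cons]
        exact ⟨fun h => huv h.symm, ih⟩

theorem rle_nil_iff (t : List Int) : rle t = [] → t = [] := by
  cases t with
  | nil => intro _; rfl
  | cons a b =>
    cases h : rle b with
    | nil => rw [rle_cons_nil a b h]; simp
    | cons p r =>
      obtain ⟨u, d⟩ := p
      rw [rle_cons_cons a b u d r h]
      by_cases hu : u = a <;> simp [hu]

theorem expand_rle (xs : List Int) : expand (rle xs) = xs := by
  induction xs with
  | nil => simp [rle, expand]
  | cons v t ih =>
    cases hrt : rle t with
    | nil =>
      have ht : t = [] := rle_nil_iff t hrt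
      subst ht
      simp [rle, expand]
    | cons q r =>
      obtain ⟨u, d⟩ := q
      have hd : 1 ≤ d := rle_counts t (u, d) (by rw [hrt]; simp)
      rw [hrt] at ih
      rw [rle_cons_cons v t u d r hrt]
      by_cases huv : u = v
      · subst huv
        rw [if_pos rfl]
        simp only [expand] at ih ⊢
        rw [show (1 + d).toNat = 1 + d.toNat by omega, List.replicate_add,
          List.replicate_one, List.append_assoc, List.singleton_append, ih]
      · rw [if_neg huv]
        show List.replicate ((1 : Int)).toNat v ++ expand ((u, d) :: r) = v :: t
        rw [ih]
        rfl

-- ---- Mre over expanded runs equals Mrun ----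
theorem Mre_replicate_zero :
    ∀ (n : Nat) (t : List Int) (prev : Option Int) (z best : Int),
    Mre (List.replicate n 0 ++ t) prev z best = Mre t prev (z + n) best := by
  intro n
  induction n with
  | zero => intro t prev z best; simp
  | succ m ih =>
    intro t prev z best
    rw [List.replicate_succ, List.cons_append]
    simp only [Mre]
    rw [ih]
    have h : z + 1 + (m : Int) = z + ((m + 1 : Nat) : Int) := by push_cast; ring
    rw [h]
    simp

theorem Mre_replicate_nonzero (v : Int) (hv : v ≠ 0) :
    ∀ (n : Nat) (t : List Int) (best : Int),
    Mre (List.replicate n v ++ t) (some v) 0 best = Mre t (some v) 0 best := by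
  intro n
  induction n with
  | zero => intro t best; simp
  | succ m ih =>
    intro t best
    rw [List.replicate_succ, List.cons_append]
    simp only [Mre, if_neg hv]
    rw [show (if v ≠ v then max best 0 else best) = best by simp]
    exact ih t best

theorem Mre_expand :
    ∀ (R : List (Int × Int)), (∀ p ∈ R, 1 ≤ p.2) →
    ∀ (prev : Option Int) (z best : Int),
    Mre (expand R) prev z best = Mrun R prev z best := by
  intro R
  induction R with
  | nil => intro _ prev z best; simp [expand, Mre, Mrun]
  | cons p R' ih =>
    obtain ⟨v, c⟩ := p
    intro H prev z best
    have hc : 1 ≤ c := H (v, c) (by simp)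
    have H' : ∀ q ∈ R', 1 ≤ q.2 := fun q hq => H q (List.mem_cons_of_mem _ hq)
    simp only [expand]
    by_cases hv : v = 0
    · subst hv
      rw [Mre_replicate_zero, ih H']
      simp only [Mrun]
      congr 1
      omega
    · rw [show c.toNat = 1 + (c.toNat - 1) by omega, List.replicate_add]
      simp only [List.replicate_one, List.cons_append]
      simp only [Mre, if_neg hv]
      simp only [List.nil_append]
      rw [Mre_replicate_nonzero v hv, ih H']
      simp [Mrun, hv]

theorem Mrun_cons_zero (c : Int) (R : List (Int × Int)) (prev : Option Int) (z best : Int) :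
    Mrun ((0, c) :: R) prev z best = Mrun R prev (z + c) best := by simp [Mrun]

theorem Mrun_cons_some (v c : Int) (R : List (Int × Int)) (w z best : Int) (hv : v ≠ 0) :
    Mrun ((v, c) :: R) (some w) z best
      = Mrun R (some v) 0 (if w ≠ v then max best z else best) := by simp [Mrun, hv]

theorem Mrun_cons_none (v c : Int) (R : List (Int × Int)) (z best : Int) (hv : v ≠ 0) :
    Mrun ((v, c) :: R) none z best = Mrun R (some v) 0 best := by simp [Mrun, hv]

-- ---- Mrun equals tscan on chain-distinct runs ----
theorem tscan_skip (p q : Int × Int) (t : List (Int × Int)) (best : Int) (hq : q.1 ≠ 0) :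
    tscan (p :: q :: t) best = tscan (q :: t) best := by
  cases t with
  | nil => simp [tscan]
  | cons r t' => simp [tscan, hq]

theorem Mrun_tscan_some :
    ∀ (n : Nat) (R : List (Int × Int)), R.length ≤ n →
    ∀ (v c best : Int), v ≠ 0 → 0 ≤ best →
    List.IsChain (fun p q : Int × Int => p.1 ≠ q.1) ((v, c) :: R) →
    Mrun R (some v) 0 best = tscan ((v, c) :: R) best := by
  intro n
  induction n with
  | zero =>
    intro R hR v c best hv hb _
    rw [List.length_eq_zero_iff.mp (Nat.le_zero.mp hR)]
    simp [Mrun, tscan]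
  | succ m ih =>
    intro R hR v c best hv hb hch
    cases R with
    | nil => simp [Mrun, tscan]
    | cons q R' =>
      obtain ⟨u, d⟩ := q
      rw [List.isChain_cons_cons] at hch
      by_cases hu : u = 0
      · subst hu
        cases R' with
        | nil => simp [Mrun, tscan]
        | cons q' R'' =>
          obtain ⟨u', d'⟩ := q'
          rw [List.isChain_cons_cons] at hch
          have hu' : u' ≠ 0 := fun h => hch.2.1 (by simp [h])
          rw [Mrun_cons_zero, zero_add, Mrun_cons_some u' d' R'' v d best hu']
          set best' : Int := if v ≠ u' then max best d else best with hbest'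
          have hb' : 0 ≤ best' := by
            rw [hbest']; split_ifs with h
            · exact le_max_of_le_left hb
            · exact hb
          rw [ih R'' (by simp at hR ⊢; omega) u' d' best' hu' hb' hch.2.2]
          rw [show tscan ((v, c) :: (0, d) :: (u', d') :: R'') best
                = tscan ((0, d) :: (u', d') :: R'') best' by
            by_cases h : v = u' <;> simp [tscan, h, hbest']]
          exact (tscan_skip (0, d) (u', d') R'' best' hu').symm
      · rw [Mrun_cons_some u d R' v 0 best hu]
        rw [show (if v ≠ u then max best 0 else best) = best by
          split_ifs
          · exact max_eq_left hb
          · rfl]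
        rw [ih R' (by simp at hR ⊢; omega) u d best hu hb hch.2]
        exact (tscan_skip (v, c) (u, d) R' best hu).symm

theorem Mrun_tscan_none :
    ∀ (R : List (Int × Int)),
    List.IsChain (fun p q : Int × Int => p.1 ≠ q.1) R →
    ∀ (z best : Int), 0 ≤ best →
    Mrun R none z best = tscan R best := by
  intro R
  induction R with
  | nil => intro _ z best _; simp [Mrun, tscan]
  | cons p R' ih =>
    obtain ⟨v, c⟩ := p
    intro hch z best hb
    by_cases hv : v = 0
    · subst hv
      rw [Mrun_cons_zero, ih hch.tail (z + c) best hb]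
      cases R' with
      | nil => simp [tscan]
      | cons q R'' =>
        rw [List.isChain_cons_cons] at hch
        have hq : q.1 ≠ 0 := fun h => hch.1 (by simp [h])
        exact (tscan_skip (0, c) q R'' best hq).symm
    · rw [Mrun_cons_none v c R' z best hv]
      exact Mrun_tscan_some R'.length R' le_rfl v c best hv hb hch

-- ---- the second loop of the port equals tscan ----
theorem port_tscan :
    ∀ (runs : List (Int × Int)) (best : Int),
    (runs.zip (runs.tail.zip runs.tail.tail)).foldl stepB best = tscan runs best := by
  intro runs
  induction runs with
  | nil => intro best; simp [tscan]
  | cons l rest ih =>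
    intro best
    cases rest with
    | nil => simp [tscan]
    | cons m rest' =>
      cases rest' with
      | nil => simp [tscan]
      | cons r t =>
        simp only [List.tail_cons, List.zip_cons_cons, List.foldl_cons]
        rw [show stepB best (l, m, r)
              = if m.1 = 0 ∧ l.1 ≠ r.1 then max best m.2 else best from rfl]
        have h := ih (if m.1 = 0 ∧ l.1 ≠ r.1 then max best m.2 else best)
        simp only [List.tail_cons] at h
        rw [h]
        simp [tscan]

-- ===== VERDICT (by name: the statement is the Claim_ definition above) =====
theorem captureForts_spec : Claim_equal_captureForts := by
  intro forts _
  unfold Spec_captureForts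
  unfold captureForts_alt
  rw [build_eq_rle, port_tscan, A_eq_Mre, ← expand_rle forts]
  rw [Mre_expand (rle forts) (rle_counts forts)]
  rw [expand_rle]
  exact Mrun_tscan_none (rle forts) (rle_chain forts) 0 0 le_rfl
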